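-- pv_equiv track=rewrite | github.com/egabosh/dabo | data-django/dabo-webui/main/views/dashboard.py | _get_unique_symbols
-- ===== SOURCE A (Python) =====
-- from collections import defaultdict
--
-- def _get_unique_symbols(files):
--     """Extract unique symbols with their available timeframes."""
--     symbols = defaultdict(list)
--     for filename in files:
--         symbol = filename.split('.history.')[0]
--         if symbol.startswith('MARKETDATA_'):
--             display_name = symbol[11:].replace('_', ' ').title()
--         elif symbol.startswith('ECONOMY_'):
--             display_name = symbol[8:].replace('-', ' ').title()
--         else:
--             display_name = symbol.upper()
--         symbols[display_name].append(filename)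
--     return dict(symbols)
-- ===== SOURCE B (Python) =====
-- def _get_unique_symbols(files):
--     def display_name(filename):
--         symbol = filename.split('.history.')[0]
--         if symbol.startswith('MARKETDATA_'):
--             return symbol[11:].replace('_', ' ').title()
--         if symbol.startswith('ECONOMY_'):
--             return symbol[8:].replace('-', ' ').title()
--         return symbol.upper()
--
--     names = [display_name(f) for f in files]
--     return {n: [f for m, f in zip(names, files) if m == n]
--             for n in dict.fromkeys(names)}
-- ===== Notes on version B (the rewrite author's own statement) =====
-- stated objective: alternative
-- what changed: Replaces A's single-pass defaultdict accumulation with a declarative pipeline: map each filename to its display name, ordered-dedup the names (dict.fromkeys), and build each group by a filter comprehension over the zipped (name, file) pairs.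
import Mathlib
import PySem

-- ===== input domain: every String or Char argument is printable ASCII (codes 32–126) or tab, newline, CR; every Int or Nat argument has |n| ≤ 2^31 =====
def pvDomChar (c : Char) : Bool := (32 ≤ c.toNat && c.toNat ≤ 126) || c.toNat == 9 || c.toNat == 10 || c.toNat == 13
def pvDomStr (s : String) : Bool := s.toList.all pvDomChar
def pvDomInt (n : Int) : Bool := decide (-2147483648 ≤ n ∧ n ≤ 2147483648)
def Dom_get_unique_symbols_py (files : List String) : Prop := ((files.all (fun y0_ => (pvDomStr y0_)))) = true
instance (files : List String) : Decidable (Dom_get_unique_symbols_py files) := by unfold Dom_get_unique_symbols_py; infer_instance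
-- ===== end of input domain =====

-- B replaces A's single-pass defaultdict accumulation by map-the-display-names /
-- ordered-dedup / per-key filter comprehensions (objective: alternative, same observable value).

-- hand port of Python str.title(), exact on the ASCII domain: a letter is uppercased
-- when the previous character is not a letter, lowercased otherwise
def pvTitleChars : Bool → List Char → List Char
  | _, [] => []
  | prev, c :: rest =>
    (if PySem.Chars.isalpha c then
        (if prev then PySem.Chars.lowerChar c else PySem.Chars.upperChar c)
      else c) :: pvTitleChars (PySem.Chars.isalpha c) rest

def pvTitle (s : String) : String := String.ofList (pvTitleChars false s.toList)

-- ===== PORT A =====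
def get_unique_symbols_py (files : List String) : List (String × List String) :=
  (files.foldl
    (fun (d : PySem.Dict String (List String)) (filename : String) =>
      let symbol := ((PySem.Str.split? filename ".history.").getD []).headD ""
      let display_name :=
        if PySem.Str.startswith symbol "MARKETDATA_" then
          pvTitle (PySem.Str.replace (String.ofList (PySem.Chars.slice symbol.toList (some 11) none)) "_" " ")
        else if PySem.Str.startswith symbol "ECONOMY_" then
          pvTitle (PySem.Str.replace (String.ofList (PySem.Chars.slice symbol.toList (some 8) none)) "-" " ")
        else
          PySem.Str.upper symbol
      d.modify display_name [] (fun v => v ++ [filename]))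
    PySem.Dict.empty).items

-- ===== PORT B =====
def displayName (filename : String) : String :=
  let symbol := ((PySem.Str.split? filename ".history.").getD []).headD ""
  if PySem.Str.startswith symbol "MARKETDATA_" then
    pvTitle (PySem.Str.replace (String.ofList (PySem.Chars.slice symbol.toList (some 11) none)) "_" " ")
  else if PySem.Str.startswith symbol "ECONOMY_" then
    pvTitle (PySem.Str.replace (String.ofList (PySem.Chars.slice symbol.toList (some 8) none)) "-" " ")
  else
    PySem.Str.upper symbol

def get_unique_symbols_py_alt (files : List String) : List (String × List String) :=
  let names := files.map displayName
  (PySem.List.dedup names).map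
    (fun n => (n, ((names.zip files).filter (fun p => p.1 == n)).map (·.2)))

-- ===== PRECONDITION & SPEC =====
def Spec_get_unique_symbols_py (files : List String) (out : List (String × List String)) : Prop := out = get_unique_symbols_py_alt files
instance (files : List String) (out : List (String × List String)) : Decidable (Spec_get_unique_symbols_py files out) := by unfold Spec_get_unique_symbols_py; infer_instance

-- ===== CLAIM (what is proved, stated in full; the proofs are below) =====
def Claim_equal_get_unique_symbols_py : Prop := ∀ (files : List String), Dom_get_unique_symbols_py files → Spec_get_unique_symbols_py files (get_unique_symbols_py files)

-- ===== LEMMAS AND PROOFS =====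

theorem get_unique_symbols_eq (files : List String) :
    get_unique_symbols_py files = get_unique_symbols_py_alt files := by
  unfold get_unique_symbols_py get_unique_symbols_py_alt
  -- A's loop body is exactly `d.modify (displayName filename) [] (· ++ [filename])`
  show (files.foldl
      (fun (d : PySem.Dict String (List String)) (filename : String) =>
        d.modify (displayName filename) [] (fun v => v ++ [filename]))
      PySem.Dict.empty).items = _
  -- view A's loop as a fold over the (display_name, filename) pairs
  have hpairs :
      files.foldl
        (fun (d : PySem.Dict String (List String)) (filename : String) =>
          d.modify (displayName filename) [] (fun v => v ++ [filename]))
        PySem.Dict.empty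
      = (files.map (fun f => (displayName f, f))).foldl
          (fun d p => d.modify p.1 [] (fun v => v ++ [p.2])) PySem.Dict.empty := by
    rw [List.foldl_map]
  rw [hpairs]
  have hnd : ((files.map (fun f => (displayName f, f))).foldl
      (fun d p => d.modify p.1 [] (fun v => v ++ [p.2])) PySem.Dict.empty).keys.Nodup :=
    PySem.Dict.nodup_keys_foldl_modify_key _ Prod.fst [] (fun _ p v => v ++ [p.2]) _
      PySem.Dict.nodup_keys_empty
  rw [PySem.Dict.items_eq_map_keys _ hnd []]
  rw [PySem.Dict.keys_foldl_modify_key _ Prod.fst [] (fun _ p v => v ++ [p.2])]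
  have hkeys : PySem.Set.update (PySem.Dict.empty : PySem.Dict String (List String)).keys
      ((files.map (fun f => (displayName f, f))).map Prod.fst)
      = PySem.List.dedup (files.map displayName) := by
    simp only [List.map_map, PySem.Dict.keys_empty, PySem.Set.update_nil_left,
      PySem.List.dedup_eq_ofList]
    rfl
  rw [hkeys]
  show _ = (PySem.List.dedup (files.map displayName)).map
    (fun n => (n, (((files.map displayName).zip files).filter (fun p => p.1 == n)).map (·.2)))
  rw [← List.map_prod_right_eq_zip]
  apply List.map_congr_left
  intro n _
  rw [PySem.Dict.getD_foldl_modify_append]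
  simp

-- ===== VERDICT (by name: the statement is the Claim_ definition above) =====
theorem get_unique_symbols_py_spec : Claim_equal_get_unique_symbols_py := by
  intro files _
  unfold Spec_get_unique_symbols_py
  exact get_unique_symbols_eq files
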